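-- pv_equiv track=rewrite | github.com/NosovaYevheniia/prg-basics | 04-Functions/7/7-28.py | f
-- ===== SOURCE A (Python) =====
-- def f(dice: str) -> int:
--     biggest_amount_of_number = 0
--     biggest_number = 0
--
--     dice_number = "123456"
--     for i in dice_number:
--         current_dice_amount = dice.count(i)
--         if current_dice_amount > biggest_amount_of_number:
--             biggest_amount_of_number = current_dice_amount
--             biggest_number = 1
--     return biggest_number
-- ===== SOURCE B (Python) =====
-- def f(dice: str) -> int:
--     return 1 if any(ch in "123456" for ch in dice) else 0
-- ===== Notes on version B (the rewrite author's own statement) =====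
-- stated objective: simpler
-- what changed: A counts each of the six faces with repeated .count scans while tracking a running maximum only to return the constant 1 whenever any face occurs; B replaces all of that with a single short-circuit membership pass returning 1 iff some character of dice is a die face.
import Mathlib
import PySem

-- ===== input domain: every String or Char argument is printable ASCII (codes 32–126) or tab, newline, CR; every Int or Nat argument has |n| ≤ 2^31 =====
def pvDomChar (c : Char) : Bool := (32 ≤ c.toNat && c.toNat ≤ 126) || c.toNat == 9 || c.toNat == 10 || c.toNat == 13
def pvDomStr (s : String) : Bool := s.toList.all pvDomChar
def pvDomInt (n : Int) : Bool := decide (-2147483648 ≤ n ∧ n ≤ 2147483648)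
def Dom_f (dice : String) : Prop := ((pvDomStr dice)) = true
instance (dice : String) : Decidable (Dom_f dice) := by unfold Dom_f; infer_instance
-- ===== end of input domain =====

-- B is simpler: A counts every face and tracks a running maximum only to return the
-- constant 1 whenever any face occurs; B is one short-circuit membership pass.

-- ===== PORT A =====
-- loop 'for i in dice_number' over state (biggest_amount_of_number, biggest_number)
def f (dice : String) : Int :=
  let r := ("123456".toList).foldl (fun (st : Int × Int) i =>
    if (PySem.Str.count dice (String.ofList [i]) : Int) > st.1 then
      ((PySem.Str.count dice (String.ofList [i]) : Int), 1)
    else st) (0, 0)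
  r.2

-- ===== PORT B =====
-- 1 if any(ch in "123456" for ch in dice) else 0
def f_alt (dice : String) : Int :=
  if dice.toList.any (fun ch => PySem.Str.isIn (String.ofList [ch]) "123456") then 1 else 0

-- ===== PRECONDITION & SPEC =====
def Spec_f (dice : String) (out : Int) : Prop := out = f_alt dice
instance (dice : String) (out : Int) : Decidable (Spec_f dice out) := by unfold Spec_f; infer_instance

-- ===== CLAIM (what is proved, stated in full; the proofs are below) =====
def Claim_equal_f : Prop := ∀ (dice : String), Dom_f dice → Spec_f dice (f dice)

-- ===== LEMMAS AND PROOFS =====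

-- Chars.count with a single-character needle is List.count
theorem chars_count_go_singleton (c : Char) (l : List Char) :
    ∀ (fuel acc : Nat), l.length ≤ fuel →
      PySem.Chars.count.go [c] fuel l acc = acc + l.count c := by
  induction l with
  | nil => intro fuel acc _; cases fuel <;> simp [PySem.Chars.count.go]
  | cons h t ih =>
    intro fuel acc hle
    cases fuel with
    | zero => simp at hle
    | succ n =>
      have ht : t.length ≤ n := by simpa using hle
      by_cases hc : c = h
      · subst hc
        simp [PySem.Chars.count.go, List.isPrefixOf, ih n (acc + 1) ht]
        omega
      · have hp : ([c].isPrefixOf (h :: t)) = false := by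
          simp [List.isPrefixOf]
          exact hc
        simp [PySem.Chars.count.go, hp, ih n acc ht, List.count_cons]
        exact fun e => hc e.symm

theorem chars_count_singleton (s : List Char) (c : Char) :
    PySem.Chars.count s [c] = s.count c := by
  simp [PySem.Chars.count]
  simpa using chars_count_go_singleton c s s.length 0 le_rfl

-- once biggest_number is 1 it stays 1
theorem foldl_snd_one (dice : String) (fs : List Char) :
    ∀ m : Int,
      (fs.foldl (fun (st : Int × Int) i =>
        if (PySem.Str.count dice (String.ofList [i]) : Int) > st.1 then
          ((PySem.Str.count dice (String.ofList [i]) : Int), 1)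
        else st) (m, 1)).2 = 1 := by
  induction fs with
  | nil => intro m; rfl
  | cons i fs ih =>
    intro m
    simp only [List.foldl_cons]
    by_cases h : ((PySem.Str.count dice (String.ofList [i]) : Int) > m)
    · rw [if_pos h]; exact ih _
    · rw [if_neg h]; exact ih m

-- from the initial state the flag records whether some face occurs
theorem foldl_from_zero (dice : String) (fs : List Char) :
    (fs.foldl (fun (st : Int × Int) i =>
      if (PySem.Str.count dice (String.ofList [i]) : Int) > st.1 then
        ((PySem.Str.count dice (String.ofList [i]) : Int), 1)
      else st) (0, 0)).2
    = if fs.any (fun i => 0 < dice.toList.count i) then 1 else 0 := by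
  induction fs with
  | nil => rfl
  | cons i fs ih =>
    simp only [List.foldl_cons, List.any_cons]
    have hc : PySem.Str.count dice (String.ofList [i]) = dice.toList.count i := by
      simp only [PySem.Str.count_eq, String.toList_ofList]
      exact chars_count_singleton dice.toList i
    by_cases h : (0 < dice.toList.count i)
    · have h1 : ((PySem.Str.count dice (String.ofList [i]) : Int) > (0 : Int)) := by
        rw [hc]; exact_mod_cast h
      rw [if_pos h1, foldl_snd_one]
      simp [h]
    · have h1 : ¬ ((PySem.Str.count dice (String.ofList [i]) : Int) > (0 : Int)) := by
        rw [hc]; exact_mod_cast h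
      rw [if_neg h1, ih]
      simp [h]

theorem singleton_infix_iff_mem (c : Char) (l : List Char) : [c] <:+: l ↔ c ∈ l := by
  constructor
  · intro ⟨s, t, h⟩; subst h; simp
  · intro h
    obtain ⟨s, t, h⟩ := List.append_of_mem h
    exact ⟨s, t, by simp [h]⟩

-- ===== VERDICT (by name: the statement is the Claim_ definition above) =====
theorem f_spec : Claim_equal_f := by
  intro dice _
  unfold Spec_f f f_alt
  rw [foldl_from_zero]
  have hiff : (("123456".toList).any (fun i => decide (0 < dice.toList.count i)))
      = (dice.toList.any (fun ch => PySem.Str.isIn (String.ofList [ch]) "123456")) := by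
    rw [Bool.eq_iff_iff]
    simp only [List.any_eq_true, decide_eq_true_eq]
    constructor
    · rintro ⟨i, hi, hcnt⟩
      refine ⟨i, List.count_pos_iff.mp hcnt, ?_⟩
      rw [PySem.Str.isIn_iff_infix, String.toList_ofList]
      exact (singleton_infix_iff_mem i _).mpr hi
    · rintro ⟨ch, hch, hin⟩
      rw [PySem.Str.isIn_iff_infix, String.toList_ofList] at hin
      exact ⟨ch, (singleton_infix_iff_mem ch _).mp hin, List.count_pos_iff.mpr hch⟩
  rw [hiff]
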